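-- pv_equiv track=rewrite | github.com/danna2240666/Algoritmos | Parcial 2/parcial_2_punto2.py | procesar_texto
-- ===== SOURCE A (Python) =====
-- def cifrar_palabra(palabra, salto):
--     """Cifra una sola palabra con el cifrado César."""
--     abecedario_min = "abcdefghijklmnñopqrstuvwxyz"
--     abecedario_may = "ABCDEFGHIJKLMNÑOPQRSTUVWXYZ"
--     resultado = ""
--
--     for letra in palabra:
--         if letra in abecedario_min:
--             nueva_pos = (abecedario_min.index(letra) + salto) % len(abecedario_min)
--             resultado += abecedario_min[nueva_pos]
--         elif letra in abecedario_may: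
--             nueva_pos = (abecedario_may.index(letra) + salto) % len(abecedario_may)
--             resultado += abecedario_may[nueva_pos]
--         else:
--             resultado += letra  # Mantener signos o caracteres no alfabéticos
--     return resultado
--
-- def descifrar_palabra(palabra, salto):
--     """Descifra una sola palabra con el cifrado César."""
--     return cifrar_palabra(palabra, -salto)
--
-- def procesar_texto(texto, modo="cifrar"):
--     """Cifra o descifra un texto completo alternando los saltos 3 y 4."""
--     palabras = texto.split()
--     resultado = []
--
--     for i, palabra in enumerate(palabras):
--         # Palabras impares usan salto 4, pares salto 3
--         salto = 4 if (i + 1) % 2 != 0 else 3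
--
--         if modo == "cifrar":
--             resultado.append(cifrar_palabra(palabra, salto))
--         else:
--             resultado.append(descifrar_palabra(palabra, salto))
--
--     return " ".join(resultado)
-- ===== SOURCE B (Python) =====
-- def procesar_texto(texto, modo="cifrar"):
--     """Cifra o descifra un texto completo alternando los saltos 3 y 4,
--     usando tablas de traduccion precalculadas en lugar de buscar cada letra."""
--     minus = "abcdefghijklmnñopqrstuvwxyz"
--     mayus = "ABCDEFGHIJKLMNÑOPQRSTUVWXYZ"
--     signo = 1 if modo == "cifrar" else -1
--
--     def tabla(salto):
--         girado = lambda abc: "".join(abc[(i + salto) % 27] for i in range(27))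
--         return str.maketrans(minus + mayus, girado(minus) + girado(mayus))
--
--     tablas = (tabla(4 * signo), tabla(3 * signo))
--     palabras = texto.split()
--     return " ".join(p.translate(tablas[i % 2]) for i, p in enumerate(palabras))
-- ===== Notes on version B (the rewrite author's own statement) =====
-- stated objective: faster
-- what changed: B precomputes four Caesar translation tables (str.maketrans over both case alphabets for shifts +4/+3 or -4/-3 per modo) once and ciphers each word with a single str.translate pass, instead of A's per-character membership test + linear .index scan + branch inside the word loop.
import Mathlib
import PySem

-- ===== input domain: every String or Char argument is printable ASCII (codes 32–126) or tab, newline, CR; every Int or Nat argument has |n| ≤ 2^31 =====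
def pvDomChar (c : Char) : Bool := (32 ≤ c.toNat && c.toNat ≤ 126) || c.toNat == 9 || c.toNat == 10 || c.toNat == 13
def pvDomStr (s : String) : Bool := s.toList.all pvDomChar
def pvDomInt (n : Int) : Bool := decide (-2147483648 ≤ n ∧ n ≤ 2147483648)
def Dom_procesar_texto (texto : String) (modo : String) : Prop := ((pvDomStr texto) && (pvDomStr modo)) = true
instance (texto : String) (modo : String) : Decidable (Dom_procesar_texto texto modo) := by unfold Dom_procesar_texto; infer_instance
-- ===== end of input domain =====

-- B replaces A's per-character alphabet scan (in / .index / slice) by four precomputed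
-- translation tables (str.maketrans / dict lookup), one translate pass per word; objective: alternative.

-- ===== PORT A =====
def pvAbcMin : List Char := "abcdefghijklmnñopqrstuvwxyz".toList
def pvAbcMay : List Char := "ABCDEFGHIJKLMNÑOPQRSTUVWXYZ".toList

-- 'letra in abecedario' / 'abecedario.index(letra)' with letra a single char are exactly
-- char-list membership / first-index; 'abecedario[pos]' with 0 ≤ pos < 27 is pyGet?.
def cifrar_palabra (palabra : String) (salto : Int) : String :=
  String.ofList (palabra.toList.foldl (fun resultado letra =>
    if letra ∈ pvAbcMin then
      match PySem.List.index? pvAbcMin letra with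
      | some i => resultado ++ (PySem.List.pyGet? pvAbcMin (PySem.Int.mod ((i : Int) + salto) 27)).toList
      | none => resultado
    else if letra ∈ pvAbcMay then
      match PySem.List.index? pvAbcMay letra with
      | some i => resultado ++ (PySem.List.pyGet? pvAbcMay (PySem.Int.mod ((i : Int) + salto) 27)).toList
      | none => resultado
    else resultado ++ [letra]) [])

def descifrar_palabra (palabra : String) (salto : Int) : String :=
  cifrar_palabra palabra (-salto)

def procesar_texto (texto : String) (modo : String) : String :=
  let palabras := PySem.Str.split₀ texto
  let resultado := (PySem.List.enumerate palabras).foldl (fun res ip =>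
    let salto : Int := if PySem.Int.mod (ip.1 + 1) 2 ≠ 0 then 4 else 3
    if modo = "cifrar" then res ++ [cifrar_palabra ip.2 salto]
    else res ++ [descifrar_palabra ip.2 salto]) []
  PySem.Str.join " " resultado

-- ===== PORT B =====
-- str.maketrans(xs, ys) is the char-to-char dict zip(xs, ys); str.translate is a map with
-- dict lookup defaulting to the char itself.
def pvGirado (abc : List Char) (salto : Int) : List Char :=
  (PySem.List.pyRange 0 27 1).map (fun i => PySem.List.pyGetD abc (PySem.Int.mod (i + salto) 27) ' ')

def pvTabla (salto : Int) : PySem.Dict Char Char :=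
  PySem.Dict.ofList ((pvAbcMin ++ pvAbcMay).zip (pvGirado pvAbcMin salto ++ pvGirado pvAbcMay salto))

def pvTranslate (t : PySem.Dict Char Char) (p : String) : String :=
  String.ofList (p.toList.map (fun c => t.getD c c))

def procesar_texto_alt (texto : String) (modo : String) : String :=
  let signo : Int := if modo = "cifrar" then 1 else -1
  let tabla0 := pvTabla (4 * signo)
  let tabla1 := pvTabla (3 * signo)
  let palabras := PySem.Str.split₀ texto
  PySem.Str.join " " ((PySem.List.enumerate palabras).map (fun ip =>
    pvTranslate (if PySem.Int.mod ip.1 2 = 0 then tabla0 else tabla1) ip.2))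

-- ===== PRECONDITION & SPEC =====
def Spec_procesar_texto (texto : String) (modo : String) (out : String) : Prop := out = procesar_texto_alt texto modo
instance (texto : String) (modo : String) (out : String) : Decidable (Spec_procesar_texto texto modo out) := by unfold Spec_procesar_texto; infer_instance

-- ===== CLAIM (what is proved, stated in full; the proofs are below) =====
def Claim_equal_procesar_texto : Prop := ∀ (texto : String) (modo : String), Dom_procesar_texto texto modo → Spec_procesar_texto texto modo (procesar_texto texto modo)

-- ===== LEMMAS AND PROOFS =====

-- the per-character output of A's loop body
def gA (salto : Int) (c : Char) : List Char :=
  if c ∈ pvAbcMin then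
    match PySem.List.index? pvAbcMin c with
    | some i => (PySem.List.pyGet? pvAbcMin (PySem.Int.mod ((i : Int) + salto) 27)).toList
    | none => []
  else if c ∈ pvAbcMay then
    match PySem.List.index? pvAbcMay c with
    | some i => (PySem.List.pyGet? pvAbcMay (PySem.Int.mod ((i : Int) + salto) 27)).toList
    | none => []
  else [c]

lemma step_eq (salto : Int) (acc : List Char) (c : Char) :
    (if c ∈ pvAbcMin then
      match PySem.List.index? pvAbcMin c with
      | some i => acc ++ (PySem.List.pyGet? pvAbcMin (PySem.Int.mod ((i : Int) + salto) 27)).toList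
      | none => acc
    else if c ∈ pvAbcMay then
      match PySem.List.index? pvAbcMay c with
      | some i => acc ++ (PySem.List.pyGet? pvAbcMay (PySem.Int.mod ((i : Int) + salto) 27)).toList
      | none => acc
    else acc ++ [c]) = acc ++ gA salto c := by
  unfold gA
  split_ifs with h1 h2
  · cases h : PySem.List.index? pvAbcMin c <;> simp
  · cases h : PySem.List.index? pvAbcMay c <;> simp
  · rfl

lemma cifrar_eq_flatMap (p : String) (salto : Int) :
    (cifrar_palabra p salto).toList = p.toList.flatMap (gA salto) := by
  unfold cifrar_palabra
  rw [PySem.List.foldl_congr_mem _ _ (fun res c => res ++ gA salto c) []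
    (by intro acc c _; exact step_eq salto acc c)]
  rw [PySem.List.foldl_append_eq_flatMap]
  simp

lemma flatMap_singleton_eq_map {α β : Type} (l : List α) (g : α → List β) (f : α → β)
    (h : ∀ c ∈ l, g c = [f c]) : l.flatMap g = l.map f := by
  induction l with
  | nil => rfl
  | cons c t ih =>
    simp only [List.flatMap_cons, List.map_cons, h c (by simp),
      ih (fun x hx => h x (by simp [hx]))]
    rfl

lemma gA_table (s : Int)
    (hk : (pvTabla s).keys = pvAbcMin ++ pvAbcMay)
    (hm : (pvAbcMin ++ pvAbcMay).all (fun c => gA s c == [(pvTabla s).getD c c]) = true) :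
    ∀ c, gA s c = [(pvTabla s).getD c c] := by
  intro c
  by_cases hc : c ∈ pvAbcMin ++ pvAbcMay
  · exact eq_of_beq (List.all_eq_true.mp hm c hc)
  · have hcont : (pvTabla s).contains c = false := by
      rw [PySem.Dict.contains_eq_decide_mem_keys, hk]
      simp [hc]
    rw [PySem.Dict.getD_of_not_contains _ _ hcont]
    simp only [gA, if_neg (fun h => hc (List.mem_append.mpr (Or.inl h))),
      if_neg (fun h => hc (List.mem_append.mpr (Or.inr h)))]

set_option maxRecDepth 6000 in
lemma word_eq (s : Int) (hs : s = 4 ∨ s = 3 ∨ s = -4 ∨ s = -3) (p : String) :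
    cifrar_palabra p s = pvTranslate (pvTabla s) p := by
  have h : ∀ c, gA s c = [(pvTabla s).getD c c] := by
    rcases hs with rfl | rfl | rfl | rfl <;>
      exact gA_table _ (by decide) (by decide)
  have : (cifrar_palabra p s).toList = (pvTranslate (pvTabla s) p).toList := by
    rw [cifrar_eq_flatMap, pvTranslate]
    rw [flatMap_singleton_eq_map _ _ _ (fun c _ => h c)]
    simp
  calc cifrar_palabra p s = String.ofList (cifrar_palabra p s).toList := by simp
    _ = String.ofList (pvTranslate (pvTabla s) p).toList := by rw [this]
    _ = pvTranslate (pvTabla s) p := by simp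

lemma parity_iff (i : Int) (hi : 0 ≤ i) :
    (PySem.Int.mod (i + 1) 2 ≠ 0) ↔ (PySem.Int.mod i 2 = 0) := by
  rw [PySem.Int.mod_eq_emod_of_pos (by norm_num), PySem.Int.mod_eq_emod_of_pos (by norm_num)]
  omega

-- ===== VERDICT (by name: the statement is the Claim_ definition above) =====
theorem procesar_texto_spec : Claim_equal_procesar_texto := by
  intro texto modo _
  unfold Spec_procesar_texto procesar_texto procesar_texto_alt
  simp only []
  congr 1
  rw [PySem.List.foldl_congr_mem _ _
    (fun res ip => res ++ [pvTranslate (if PySem.Int.mod ip.1 2 = 0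
        then pvTabla (4 * (if modo = "cifrar" then (1:Int) else -1))
        else pvTabla (3 * (if modo = "cifrar" then (1:Int) else -1))) ip.2]) []
    ?_]
  · rw [PySem.List.foldl_append_singleton_eq_map]
    simp
  · intro acc ip hip
    obtain ⟨k, hk, rfl⟩ := (PySem.List.mem_enumerate_iff _ _ _).1 hip
    have hk0 : (0:Int) ≤ 0 + (k:Int) := by positivity
    simp only []
    congr 1
    by_cases hpar : PySem.Int.mod ((0 + (k:Int)) + 1) 2 ≠ 0
    · have h2 : PySem.Int.mod (0 + (k:Int)) 2 = 0 := (parity_iff _ hk0).1 hpar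
      rw [if_pos hpar, if_pos h2]
      by_cases hm : modo = "cifrar"
      · rw [if_pos hm, if_pos hm, word_eq 4 (by norm_num)]
        norm_num
      · rw [if_neg hm, if_neg hm, descifrar_palabra, word_eq (-4) (by norm_num)]
        norm_num
    · have h2 : ¬ PySem.Int.mod (0 + (k:Int)) 2 = 0 := fun h => hpar ((parity_iff _ hk0).2 h)
      rw [if_neg hpar, if_neg h2]
      by_cases hm : modo = "cifrar"
      · rw [if_pos hm, if_pos hm, word_eq 3 (by norm_num)]
        norm_num
      · rw [if_neg hm, if_neg hm, descifrar_palabra, word_eq (-3) (by norm_num)]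
        norm_num
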